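-- pv_equiv track=rewrite | github.com/WailAhmad/get-me-a-job | backend/routers/chat.py | _message_mentions_roles
-- ===== SOURCE A (Python) =====
-- def _message_mentions_roles(text: str) -> bool:
--     t = (text or "").lower()
--     role_terms = (
--         "role", "roles", "title", "titles", "job", "jobs", "position", "positions",
--         "billing", "invoice", "invoicing", "accounts receivable", "finance",
--         "data", "ai", "artificial intelligence", "machine learning", "analyst",
--         "manager", "director", "head", "chief", "specialist", "engineer",
--         "architect", "product", "governance", "transformation"
--     )
--     return any(term in t for term in role_terms)
-- ===== SOURCE B (Python) =====
-- # Terms built once by splitting a single '|'-joined pattern string; the text is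
-- # then scanned position by position, testing at each index whether any term
-- # starts there (instead of one full substring search per term as in A).
-- _ROLE_TERMS = (
--     "role|roles|title|titles|job|jobs|position|positions|"
--     "billing|invoice|invoicing|accounts receivable|finance|"
--     "data|ai|artificial intelligence|machine learning|analyst|"
--     "manager|director|head|chief|specialist|engineer|"
--     "architect|product|governance|transformation"
-- ).split("|")
--
--
-- def _message_mentions_roles(text: str) -> bool:
--     t = (text or "").lower()
--     i = 0
--     n = len(t)
--     while i < n:
--         for term in _ROLE_TERMS:
--             if t.startswith(term, i):
--                 return True
--         i += 1
--     return False
-- ===== Notes on version B (the rewrite author's own statement) =====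
-- stated objective: alternative
-- what changed: B builds the term table once by splitting a single delimiter-joined pattern string and replaces A's per-term full-text substring searches by one position-outer scan of the text that tests at each index whether any term starts there, returning at the first matching position.
import Mathlib
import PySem

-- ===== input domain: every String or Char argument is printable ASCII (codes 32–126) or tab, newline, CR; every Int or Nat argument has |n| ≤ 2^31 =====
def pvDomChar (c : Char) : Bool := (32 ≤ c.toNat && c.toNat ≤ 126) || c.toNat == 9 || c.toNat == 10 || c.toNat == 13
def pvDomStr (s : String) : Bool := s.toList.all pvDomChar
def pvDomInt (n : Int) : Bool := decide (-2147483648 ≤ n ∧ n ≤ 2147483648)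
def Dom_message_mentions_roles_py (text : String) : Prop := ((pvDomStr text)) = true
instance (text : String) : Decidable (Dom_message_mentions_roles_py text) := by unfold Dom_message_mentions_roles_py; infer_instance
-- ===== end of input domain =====

-- B builds its term table by splitting one '|'-joined pattern string and scans the text
-- position by position, testing at each index whether any term starts there (alternative, same cost).

-- ===== PORT A =====
-- Source A's role_terms tuple
def roleTerms : List String :=
  ["role", "roles", "title", "titles", "job", "jobs", "position", "positions",
   "billing", "invoice", "invoicing", "accounts receivable", "finance",
   "data", "ai", "artificial intelligence", "machine learning", "analyst",
   "manager", "director", "head", "chief", "specialist", "engineer",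
   "architect", "product", "governance", "transformation"]

def message_mentions_roles_py (text : String) : Bool :=
  -- t = (text or "").lower()
  let t := PySem.Str.lower (if text == "" then "" else text)
  -- any(term in t for term in role_terms)
  roleTerms.any (fun term => PySem.Str.isIn term t)

-- ===== PORT B =====
-- Source B's _ROLE_TERMS = "<pattern>".split("|")
-- "<pattern>".split("|"): sep = "|" ≠ "", so split? is always some
def altTerms : List String :=
  (PySem.Str.split?
    "role|roles|title|titles|job|jobs|position|positions|billing|invoice|invoicing|accounts receivable|finance|data|ai|artificial intelligence|machine learning|analyst|manager|director|head|chief|specialist|engineer|architect|product|governance|transformation"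
    "|").getD []

-- the 'while i < n' loop of Source B: testing t.startswith(term, i) then i += 1 is the
-- structural recursion on the suffix t[i:] (startswith at i = prefix of the suffix)
def altScan (terms : List (List Char)) : List Char → Bool
  | [] => false
  | c :: rest =>
      if terms.any (fun term => PySem.Chars.startswith (c :: rest) term) then true
      else altScan terms rest

def message_mentions_roles_py_alt (text : String) : Bool :=
  -- t = (text or "").lower()
  let t := PySem.Str.lower (if text == "" then "" else text)
  altScan (altTerms.map String.toList) t.toList

-- ===== PRECONDITION & SPEC =====
def Spec_message_mentions_roles_py (text : String) (out : Bool) : Prop := out = message_mentions_roles_py_alt text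
instance (text : String) (out : Bool) : Decidable (Spec_message_mentions_roles_py text out) := by unfold Spec_message_mentions_roles_py; infer_instance

-- ===== CLAIM (what is proved, stated in full; the proofs are below) =====
def Claim_equal_message_mentions_roles_py : Prop := ∀ (text : String), Dom_message_mentions_roles_py text → Spec_message_mentions_roles_py text (message_mentions_roles_py text)

-- ===== LEMMAS AND PROOFS =====
set_option maxRecDepth 4000 in
theorem altTerms_eq : altTerms.map String.toList = roleTerms.map String.toList := by decide

theorem roleTerms_ne_nil : ∀ x ∈ roleTerms, x.toList ≠ [] := by decide

-- altScan finds exactly the suffixes some term is a prefix of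
theorem altScan_iff (terms : List (List Char)) (hne : ∀ p ∈ terms, p ≠ []) (s : List Char) :
    altScan terms s = true ↔ ∃ p ∈ terms, ∃ j, p <+: s.drop j := by
  induction s with
  | nil =>
      simp only [altScan]
      constructor
      · intro h; cases h
      · rintro ⟨p, hp, j, hpre⟩
        rw [List.drop_nil] at hpre
        exact absurd (List.prefix_nil.mp hpre) (hne p hp)
  | cons c rest ih =>
      simp only [altScan]
      split_ifs with h
      · simp only [true_iff]
        obtain ⟨p, hp, hsw⟩ := List.any_eq_true.mp h
        exact ⟨p, hp, 0, by simpa using (PySem.Chars.startswith_iff _ _).mp hsw⟩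
      · rw [ih]
        constructor
        · rintro ⟨p, hp, j, hpre⟩
          exact ⟨p, hp, j + 1, by simpa using hpre⟩
        · rintro ⟨p, hp, j, hpre⟩
          cases j with
          | zero =>
              exfalso
              exact h (List.any_eq_true.mpr ⟨p, hp,
                (PySem.Chars.startswith_iff _ _).mpr (by simpa using hpre)⟩)
          | succ j' =>
              exact ⟨p, hp, j', by simpa using hpre⟩

-- ===== VERDICT (by name: the statement is the Claim_ definition above) =====
theorem message_mentions_roles_py_spec : Claim_equal_message_mentions_roles_py := by
  intro text _
  unfold Spec_message_mentions_roles_py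
  unfold message_mentions_roles_py message_mentions_roles_py_alt
  rw [Bool.eq_iff_iff]
  rw [show altTerms.map String.toList = roleTerms.map String.toList from altTerms_eq]
  set s := (PySem.Str.lower (if text == "" then "" else text)).toList with hs
  have hne : ∀ p ∈ roleTerms.map String.toList, p ≠ [] := by
    intro p hp
    obtain ⟨x, hx, rfl⟩ := List.mem_map.mp hp
    exact roleTerms_ne_nil x hx
  rw [altScan_iff _ hne s]
  simp only [List.any_eq_true, PySem.Str.isIn_eq, List.mem_map]
  constructor
  · rintro ⟨term, hmem, hin⟩
    obtain ⟨j, hj⟩ := (PySem.Chars.exists_prefix_drop_iff_isIn _ _).mpr hin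
    exact ⟨term.toList, ⟨term, hmem, rfl⟩, j, hj⟩
  · rintro ⟨p, ⟨term, hmem, rfl⟩, j, hj⟩
    exact ⟨term, hmem, (PySem.Chars.exists_prefix_drop_iff_isIn _ _).mp ⟨j, hj⟩⟩
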